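-- pv_equiv track=rewrite | github.com/Frankatvan/Excel-Master | excel-master-app/api/logic/aiwb_finance/finance_engine.py | _find_material_margin_rows_109
-- ===== SOURCE A (Python) =====
-- from typing import Any, Dict, List, Mapping, Sequence, Tuple
--
-- def _find_material_margin_rows_109(
--     label_rows: Dict[str, List[int]],
--     row_wbh_cogs: int | None,
--     row_wbh_inv: int | None,
-- ) -> Tuple[int | None, int | None]:
--     mm_rows = sorted(label_rows.get("material margin", []))
--     if not mm_rows:
--         return None, None
--
--     main_row: int | None = None
--     inv_row: int | None = None
--
--     if row_wbh_cogs is not None: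
--         for r in mm_rows:
--             if r > row_wbh_cogs:
--                 main_row = r
--                 break
--
--     if row_wbh_inv is not None:
--         for r in mm_rows:
--             if r > row_wbh_inv:
--                 inv_row = r
--                 break
--
--     if main_row is None:
--         main_row = mm_rows[0]
--     if inv_row is None:
--         inv_row = mm_rows[-1] if len(mm_rows) > 1 else mm_rows[0]
--
--     return main_row, inv_row
-- ===== SOURCE B (Python) =====
-- def _find_material_margin_rows_109(label_rows, row_wbh_cogs, row_wbh_inv):
--     rows = label_rows.get("material margin", [])
--     if not rows:
--         return None, None
--     if row_wbh_cogs is None: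
--         main_row = min(rows)
--     else:
--         main_row = min((r for r in rows if r > row_wbh_cogs), default=min(rows))
--     if row_wbh_inv is None:
--         inv_row = max(rows)
--     else:
--         inv_row = min((r for r in rows if r > row_wbh_inv), default=max(rows))
--     return main_row, inv_row
-- ===== Notes on version B (the rewrite author's own statement) =====
-- stated objective: alternative
-- what changed: B drops the sort entirely: instead of sorting and scanning for the first element above each threshold, it takes min/max of the raw list and the minimum of the elements above each threshold in single passes.
import Mathlib
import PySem

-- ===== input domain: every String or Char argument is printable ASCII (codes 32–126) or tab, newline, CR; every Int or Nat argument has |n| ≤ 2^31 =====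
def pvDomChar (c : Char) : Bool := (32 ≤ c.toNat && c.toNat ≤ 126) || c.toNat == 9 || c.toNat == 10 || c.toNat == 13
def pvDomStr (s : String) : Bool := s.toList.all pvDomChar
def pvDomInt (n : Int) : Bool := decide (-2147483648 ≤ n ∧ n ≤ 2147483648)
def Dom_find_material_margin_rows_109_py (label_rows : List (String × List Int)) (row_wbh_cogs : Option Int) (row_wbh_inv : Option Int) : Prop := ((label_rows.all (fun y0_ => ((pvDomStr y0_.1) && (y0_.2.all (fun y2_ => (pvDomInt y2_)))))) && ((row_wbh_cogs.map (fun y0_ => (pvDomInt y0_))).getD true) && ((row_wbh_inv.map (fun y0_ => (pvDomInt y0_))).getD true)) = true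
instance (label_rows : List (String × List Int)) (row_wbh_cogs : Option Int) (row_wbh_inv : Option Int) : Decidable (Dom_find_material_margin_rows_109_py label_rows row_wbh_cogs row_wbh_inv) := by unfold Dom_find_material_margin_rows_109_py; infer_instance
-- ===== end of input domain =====

-- B replaces sort-then-scan by min/max passes over the raw list (alternative decomposition, similar measured cost).

-- ===== PORT A =====
-- the 'for r in mm_rows: if r > t: …; break' loop of A
def pvAScan (t : Int) : List Int → Option Int
  | [] => none
  | r :: rs => if r > t then some r else pvAScan t rs

def find_material_margin_rows_109_py (label_rows : List (String × List Int)) (row_wbh_cogs : Option Int) (row_wbh_inv : Option Int) : Option Int × Option Int :=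
  let mm := PySem.List.sorted (PySem.Dict.getD (PySem.Dict.mk label_rows) "material margin" []) (fun x => x) false
  if mm = [] then (none, none)
  else
    let main0 : Option Int := match row_wbh_cogs with
      | none => none
      | some c => pvAScan c mm
    let inv0 : Option Int := match row_wbh_inv with
      | none => none
      | some t => pvAScan t mm
    let main : Option Int := match main0 with
      | some m => some m
      | none => PySem.List.pyGet? mm 0
    let inv : Option Int := match inv0 with
      | some m => some m
      | none => if mm.length > 1 then PySem.List.pyGet? mm (-1) else PySem.List.pyGet? mm 0
    (main, inv)

-- ===== PORT B =====
def find_material_margin_rows_109_py_alt (label_rows : List (String × List Int)) (row_wbh_cogs : Option Int) (row_wbh_inv : Option Int) : Option Int × Option Int :=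
  let rows := PySem.Dict.getD (PySem.Dict.mk label_rows) "material margin" []
  if rows = [] then (none, none)
  else
    let main : Option Int := match row_wbh_cogs with
      | none => PySem.List.min? rows (fun x => x)
      | some c => some ((PySem.List.min? (rows.filter (fun r => decide (c < r))) (fun x => x)).getD
                        ((PySem.List.min? rows (fun x => x)).getD 0))
    let inv : Option Int := match row_wbh_inv with
      | none => PySem.List.max? rows (fun x => x)
      | some t => some ((PySem.List.min? (rows.filter (fun r => decide (t < r))) (fun x => x)).getD
                        ((PySem.List.max? rows (fun x => x)).getD 0))
    (main, inv)

-- ===== PRECONDITION & SPEC =====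
def Spec_find_material_margin_rows_109_py (label_rows : List (String × List Int)) (row_wbh_cogs : Option Int) (row_wbh_inv : Option Int) (out : Option Int × Option Int) : Prop := out = find_material_margin_rows_109_py_alt label_rows row_wbh_cogs row_wbh_inv
instance (label_rows : List (String × List Int)) (row_wbh_cogs : Option Int) (row_wbh_inv : Option Int) (out : Option Int × Option Int) : Decidable (Spec_find_material_margin_rows_109_py label_rows row_wbh_cogs row_wbh_inv out) := by unfold Spec_find_material_margin_rows_109_py; infer_instance

-- ===== CLAIM (what is proved, stated in full; the proofs are below) =====
def Claim_equal_find_material_margin_rows_109_py : Prop := ∀ (label_rows : List (String × List Int)) (row_wbh_cogs : Option Int) (row_wbh_inv : Option Int), Dom_find_material_margin_rows_109_py label_rows row_wbh_cogs row_wbh_inv → Spec_find_material_margin_rows_109_py label_rows row_wbh_cogs row_wbh_inv (find_material_margin_rows_109_py label_rows row_wbh_cogs row_wbh_inv)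

-- ===== LEMMAS AND PROOFS =====

-- value of min?/max? with identity key is invariant under permutation
theorem pv_min?_id_perm {xs ys : List Int} (h : xs.Perm ys) :
    PySem.List.min? xs (fun x => x) = PySem.List.min? ys (fun x => x) := by
  cases hx : PySem.List.min? xs (fun x => x) with
  | none =>
    rw [PySem.List.min?_eq_none_iff] at hx
    subst hx
    exact ((PySem.List.min?_eq_none_iff ys _).mpr h.symm.eq_nil).symm
  | some m =>
    have hm' : m ∈ ys := h.mem_iff.mp (PySem.List.min?_mem hx)
    cases hy : PySem.List.min? ys (fun x => x) with
    | none =>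
      rw [PySem.List.min?_eq_none_iff] at hy
      subst hy
      simp at hm'
    | some m' =>
      have h1 := PySem.List.min?_isMin hx m' (h.mem_iff.mpr (PySem.List.min?_mem hy))
      have h2 := PySem.List.min?_isMin hy m hm'
      simp only at h1 h2
      rw [le_antisymm h1 h2]

theorem pv_max?_id_perm {xs ys : List Int} (h : xs.Perm ys) :
    PySem.List.max? xs (fun x => x) = PySem.List.max? ys (fun x => x) := by
  cases hx : PySem.List.max? xs (fun x => x) with
  | none =>
    rw [PySem.List.max?_eq_none_iff] at hx
    subst hx
    exact ((PySem.List.max?_eq_none_iff ys _).mpr h.symm.eq_nil).symm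
  | some m =>
    have hm' : m ∈ ys := h.mem_iff.mp (PySem.List.max?_mem hx)
    cases hy : PySem.List.max? ys (fun x => x) with
    | none =>
      rw [PySem.List.max?_eq_none_iff] at hy
      subst hy
      simp at hm'
    | some m' =>
      have h1 := PySem.List.max?_isMax hx m' (h.mem_iff.mpr (PySem.List.max?_mem hy))
      have h2 := PySem.List.max?_isMax hy m hm'
      simp only at h1 h2
      rw [le_antisymm h2 h1]

theorem pv_foldl_min_eq (l : List Int) : ∀ a : Int, (∀ x ∈ l, a ≤ x) → l.foldl min a = a := by
  induction l with
  | nil => intro a _; rfl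
  | cons x t ih =>
    intro a h
    have hax : a ≤ x := h x (by simp)
    simp only [List.foldl_cons, min_eq_left hax]
    exact ih a (fun y hy => h y (by simp [hy]))

theorem pv_min?_cons_of_le (r : Int) (l : List Int) (h : ∀ x ∈ l, r ≤ x) :
    PySem.List.min? (r :: l) (fun x => x) = some r := by
  rw [PySem.List.min?_id_cons]
  rw [pv_foldl_min_eq l r h]

-- on a ≤-sorted list, A's first-element-above-t scan is the min of the elements above t
theorem pv_scan_eq_min?_filter (t : Int) (mm : List Int) (h : mm.Pairwise (· ≤ ·)) :
    pvAScan t mm = PySem.List.min? (mm.filter (fun r => decide (t < r))) (fun x => x) := by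
  induction mm with
  | nil =>
    simp only [pvAScan, List.filter_nil]
    exact ((PySem.List.min?_eq_none_iff [] _).mpr rfl).symm
  | cons r rs ih =>
    rw [List.pairwise_cons] at h
    by_cases hr : t < r
    · have hf : (r :: rs).filter (fun r => decide (t < r)) = r :: rs.filter (fun r => decide (t < r)) := by
        simp [List.filter_cons, hr]
      rw [hf]
      have : pvAScan t (r :: rs) = some r := by simp [pvAScan, hr]
      rw [this]
      exact (pv_min?_cons_of_le r _ (fun x hx => h.1 x (List.mem_of_mem_filter hx))).symm
    · have hf : (r :: rs).filter (fun r => decide (t < r)) = rs.filter (fun r => decide (t < r)) := by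
        simp [List.filter_cons, hr]
      rw [hf]
      have : pvAScan t (r :: rs) = pvAScan t rs := by simp [pvAScan, hr]
      rw [this]
      exact ih h.2

theorem pv_head_eq_min? (m : Int) (tl : List Int) (h : (m :: tl).Pairwise (· ≤ ·)) :
    PySem.List.pyGet? (m :: tl) 0 = PySem.List.min? (m :: tl) (fun x => x) := by
  rw [List.pairwise_cons] at h
  rw [PySem.List.pyGet?_zero_cons, (pv_min?_cons_of_le m tl h.1)]

theorem pv_le_getLast : ∀ (l : List Int) (hne : l ≠ []), l.Pairwise (· ≤ ·) →
    ∀ x ∈ l, x ≤ l.getLast hne := by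
  intro l
  induction l with
  | nil => intro hne; exact absurd rfl hne
  | cons a t ih =>
    intro hne hp x hx
    rw [List.pairwise_cons] at hp
    cases t with
    | nil => simp at hx; simp [hx, List.getLast]
    | cons b t' =>
      rw [List.getLast_cons (by simp)]
      rcases List.mem_cons.mp hx with rfl | hx'
      · exact le_trans (hp.1 _ (List.getLast_mem _)) (le_refl _)
      · exact ih (by simp) hp.2 x hx'

theorem pv_last_eq_max? (m : Int) (tl : List Int) (h : (m :: tl).Pairwise (· ≤ ·)) :
    PySem.List.pyGet? (m :: tl) (-1) = PySem.List.max? (m :: tl) (fun x => x) := by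
  rw [PySem.List.pyGet?_neg_one]
  cases hy : PySem.List.max? (m :: tl) (fun x => x) with
  | none => rw [PySem.List.max?_eq_none_iff] at hy; simp at hy
  | some M =>
    have hne : (m :: tl) ≠ [] := by simp
    rw [List.getLast?_eq_some_getLast hne]
    congr 1
    have h1 : (m :: tl).getLast hne ≤ M := PySem.List.max?_isMax hy _ (List.getLast_mem hne)
    have h2 : M ≤ (m :: tl).getLast hne := pv_le_getLast _ hne h M (PySem.List.max?_mem hy)
    omega

-- ===== VERDICT (by name: the statement is the Claim_ definition above) =====
theorem find_material_margin_rows_109_py_spec : Claim_equal_find_material_margin_rows_109_py := by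
  intro lr c? i? _
  unfold Spec_find_material_margin_rows_109_py
  unfold find_material_margin_rows_109_py find_material_margin_rows_109_py_alt
  set rows := PySem.Dict.getD (PySem.Dict.mk lr) "material margin" ([] : List Int) with hrowsdef
  set mm := PySem.List.sorted rows (fun x => x) false with hmmdef
  have hperm : mm.Perm rows := PySem.List.sorted_perm rows _ false
  have hpw : mm.Pairwise (· ≤ ·) := PySem.List.sorted_pairwise rows (fun x => x)
  by_cases hrows : rows = []
  · have hmm : mm = [] := by rw [hrows] at hperm; exact hperm.eq_nil
    simp [hmm, hrows]
  · have hmmne : mm ≠ [] := by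
      intro e
      rw [e] at hperm
      exact hrows hperm.symm.eq_nil
    simp only [if_neg hmmne, if_neg hrows]
    obtain ⟨m, tl, hcons⟩ := List.exists_cons_of_ne_nil hmmne
    obtain ⟨v0, hv0⟩ : ∃ v, PySem.List.min? rows (fun x => x) = some v := by
      cases hy : PySem.List.min? rows (fun x => x) with
      | none => rw [PySem.List.min?_eq_none_iff] at hy; exact absurd hy hrows
      | some v => exact ⟨v, rfl⟩
    obtain ⟨w0, hw0⟩ : ∃ w, PySem.List.max? rows (fun x => x) = some w := by
      cases hy : PySem.List.max? rows (fun x => x) with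
      | none => rw [PySem.List.max?_eq_none_iff] at hy; exact absurd hy hrows
      | some w => exact ⟨w, rfl⟩
    have hhead : PySem.List.pyGet? mm 0 = some v0 := by
      rw [hcons, pv_head_eq_min? m tl (hcons ▸ hpw)]
      rw [← hcons, pv_min?_id_perm hperm, hv0]
    have hlast : (if mm.length > 1 then PySem.List.pyGet? mm (-1) else PySem.List.pyGet? mm 0) = some w0 := by
      have hmax : PySem.List.max? mm (fun x => x) = some w0 := by
        rw [pv_max?_id_perm hperm, hw0]
      cases tl with
      | nil =>
        have hlen : ¬ mm.length > 1 := by rw [hcons]; simp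
        rw [if_neg hlen, hcons, PySem.List.pyGet?_zero_cons]
        rw [hcons] at hmax
        rw [PySem.List.max?_id_cons] at hmax
        simpa using hmax
      | cons b tl' =>
        have hlen : mm.length > 1 := by rw [hcons]; simp
        rw [if_pos hlen, hcons, pv_last_eq_max? m (b :: tl') (hcons ▸ hpw), ← hcons, hmax]
    have hlast2 : (if 1 < mm.length then PySem.List.pyGet? mm (-1) else some v0) = some w0 := by
      rw [← hhead]; exact hlast
    have hscan : ∀ t : Int, pvAScan t mm =
        PySem.List.min? (rows.filter (fun r => decide (t < r))) (fun x => x) := by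
      intro t
      rw [pv_scan_eq_min?_filter t mm hpw]
      exact pv_min?_id_perm (hperm.filter _)
    cases c? with
    | none =>
      cases i? with
      | none => simp [hhead, hlast, hlast2, hv0, hw0]
      | some ti =>
        cases hfi : PySem.List.min? (rows.filter (fun r => decide (ti < r))) (fun x => x) with
        | none => simp [hscan ti, hfi, hhead, hlast, hlast2, hv0, hw0]
        | some vi => simp [hscan ti, hfi, hhead, hlast, hlast2, hv0, hw0]
    | some tc =>
      cases hfc : PySem.List.min? (rows.filter (fun r => decide (tc < r))) (fun x => x) with
      | none =>
        cases i? with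
        | none => simp [hscan tc, hfc, hhead, hlast, hlast2, hv0, hw0]
        | some ti =>
          cases hfi : PySem.List.min? (rows.filter (fun r => decide (ti < r))) (fun x => x) with
          | none => simp [hscan tc, hscan ti, hfc, hfi, hhead, hlast, hlast2, hv0, hw0]
          | some vi => simp [hscan tc, hscan ti, hfc, hfi, hhead, hlast, hlast2, hv0, hw0]
      | some vc =>
        cases i? with
        | none => simp [hscan tc, hfc, hhead, hlast, hlast2, hv0, hw0]
        | some ti =>
          cases hfi : PySem.List.min? (rows.filter (fun r => decide (ti < r))) (fun x => x) with
          | none => simp [hscan tc, hscan ti, hfc, hfi, hhead, hlast, hlast2, hv0, hw0]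
          | some vi => simp [hscan tc, hscan ti, hfc, hfi, hhead, hlast, hlast2, hv0, hw0]
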